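-- pv_equiv track=rewrite | github.com/launchplugai/BetApp | app/structure_snapshot.py | detect_volatility_sources_from_types
-- ===== SOURCE A (Python) =====
-- def detect_volatility_sources_from_types(leg_types: tuple[str, ...]) -> tuple[str, ...]:
--     """
--     Detect sources of volatility from leg type strings.
--
--     Same logic as detect_volatility_sources but works with string leg types
--     from canonical legs instead of BetBlock objects.
--
--     Args:
--         leg_types: Tuple of leg type strings (e.g., "player_prop", "total")
--
--     Returns:
--         Tuple of volatility source strings
--     """
--     sources = set()
--
--     for leg_type in leg_types:
--         if leg_type == "player_prop":
--             sources.add("player_prop")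
--         if leg_type in ("total", "team_total"):
--             sources.add("totals")
--
--     return tuple(sorted(sources))  # Sort for determinism
-- ===== SOURCE B (Python) =====
-- def detect_volatility_sources_from_types(leg_types):
--     types = set(leg_types)
--     sources = []
--     if "player_prop" in types:
--         sources.append("player_prop")
--     if types & {"total", "team_total"}:
--         sources.append("totals")
--     return tuple(sources)
-- ===== Notes on version B (the rewrite author's own statement) =====
-- stated objective: idiomatic
-- what changed: Replaces the per-leg branching accumulation loop with an index-first computation: build the distinct leg types once as a set, then derive each label by a constant-time membership/intersection test, emitting the labels directly in sorted order (no sort call).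
import Mathlib
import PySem

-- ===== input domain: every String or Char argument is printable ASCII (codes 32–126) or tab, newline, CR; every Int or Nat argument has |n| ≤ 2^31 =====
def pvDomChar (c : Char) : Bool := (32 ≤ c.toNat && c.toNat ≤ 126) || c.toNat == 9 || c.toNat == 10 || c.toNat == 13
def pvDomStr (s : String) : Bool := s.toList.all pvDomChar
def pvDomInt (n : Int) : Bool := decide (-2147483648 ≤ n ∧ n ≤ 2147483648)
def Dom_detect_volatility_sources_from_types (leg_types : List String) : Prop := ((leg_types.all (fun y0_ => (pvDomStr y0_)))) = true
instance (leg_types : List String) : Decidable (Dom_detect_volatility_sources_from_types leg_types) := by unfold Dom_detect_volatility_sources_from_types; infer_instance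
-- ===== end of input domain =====

-- B replaces the per-leg branching loop by one distinct-type set plus two membership tests,
-- emitting the labels directly in sorted order (idiomatic; same return values).

-- ===== PORT A =====
-- the 'for leg_type in leg_types' loop accumulating into the set 'sources'
def pvALoop (sources : PySem.Set String) : List String → PySem.Set String
  | [] => sources
  | leg_type :: rest =>
      let s1 := if leg_type == "player_prop" then PySem.Set.add sources "player_prop" else sources
      let s2 := if leg_type == "total" || leg_type == "team_total" then PySem.Set.add s1 "totals" else s1
      pvALoop s2 rest

def detect_volatility_sources_from_types (leg_types : List String) : List String :=
  PySem.List.sorted (pvALoop PySem.Set.empty leg_types) (fun x => x) false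

-- ===== PORT B =====
def detect_volatility_sources_from_types_alt (leg_types : List String) : List String :=
  let types : PySem.Set String := PySem.Set.ofList leg_types
  (if PySem.Set.contains types "player_prop" then ["player_prop"] else []) ++
  (if ¬ (PySem.Set.inter types ["total", "team_total"]).isEmpty then ["totals"] else [])

-- ===== PRECONDITION & SPEC =====
def Spec_detect_volatility_sources_from_types (leg_types : List String) (out : List String) : Prop := out = detect_volatility_sources_from_types_alt leg_types
instance (leg_types : List String) (out : List String) : Decidable (Spec_detect_volatility_sources_from_types leg_types out) := by unfold Spec_detect_volatility_sources_from_types; infer_instance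

-- ===== CLAIM (what is proved, stated in full; the proofs are below) =====
def Claim_equal_detect_volatility_sources_from_types : Prop := ∀ (leg_types : List String), Dom_detect_volatility_sources_from_types leg_types → Spec_detect_volatility_sources_from_types leg_types (detect_volatility_sources_from_types leg_types)

-- ===== LEMMAS AND PROOFS =====

theorem pvALoop_nodup (xs : List String) (s : PySem.Set String) (hs : s.Nodup) :
    (pvALoop s xs).Nodup := by
  induction xs generalizing s with
  | nil => simpa [pvALoop] using hs
  | cons x xs ih =>
      simp only [pvALoop]
      apply ih
      split
      · split
        · exact PySem.Set.nodup_add _ _ (PySem.Set.nodup_add _ _ hs)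
        · exact PySem.Set.nodup_add _ _ hs
      · split
        · exact PySem.Set.nodup_add _ _ hs
        · exact hs

theorem pvALoop_mem (xs : List String) (s : PySem.Set String) (y : String) :
    y ∈ pvALoop s xs ↔
      y ∈ s ∨ (y = "player_prop" ∧ "player_prop" ∈ xs) ∨
        (y = "totals" ∧ ("total" ∈ xs ∨ "team_total" ∈ xs)) := by
  induction xs generalizing s with
  | nil => simp [pvALoop]
  | cons x xs ih =>
      simp only [pvALoop, ih, List.mem_cons]
      by_cases h1 : x = "player_prop" <;> by_cases h2 : x = "total" <;>
        by_cases h3 : x = "team_total" <;>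
        simp_all [PySem.Set.mem_add] <;> tauto

theorem pvInterNonempty (l : List String) :
    (¬ ((PySem.Set.inter (PySem.Set.ofList l) ["total", "team_total"]).isEmpty = true)) ↔
      ("total" ∈ l ∨ "team_total" ∈ l) := by
  simp only [List.isEmpty_iff, List.eq_nil_iff_forall_not_mem, PySem.Set.mem_inter,
    PySem.Set.mem_ofList, not_forall, not_not]
  constructor
  · rintro ⟨x, hx⟩
    simp only [List.mem_cons, List.not_mem_nil, or_false] at hx ⊢
    rcases hx with ⟨hxl, h | h⟩ <;> subst h
    · exact Or.inl hxl
    · exact Or.inr hxl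
  · rintro (h | h)
    · exact ⟨"total", by simpa using h⟩
    · exact ⟨"team_total", by simpa using h⟩

theorem pvInterNe (l : List String) :
    (¬ (PySem.Set.inter (PySem.Set.ofList l) ["total", "team_total"] = [])) ↔
      ("total" ∈ l ∨ "team_total" ∈ l) := by
  rw [← pvInterNonempty l, List.isEmpty_iff]

theorem alt_mem (leg_types : List String) (y : String) :
    y ∈ detect_volatility_sources_from_types_alt leg_types ↔
      (y = "player_prop" ∧ "player_prop" ∈ leg_types) ∨
        (y = "totals" ∧ ("total" ∈ leg_types ∨ "team_total" ∈ leg_types)) := by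
  simp only [detect_volatility_sources_from_types_alt, List.mem_append]
  by_cases hp : "player_prop" ∈ leg_types <;>
    by_cases h2 : "total" ∈ leg_types ∨ "team_total" ∈ leg_types <;>
    simp [PySem.Set.mem_ofList, hp, h2, pvInterNe]

theorem alt_nodup_sorted (leg_types : List String) :
    (detect_volatility_sources_from_types_alt leg_types).Nodup ∧
      (detect_volatility_sources_from_types_alt leg_types).Pairwise (fun a b => a < b) := by
  simp only [detect_volatility_sources_from_types_alt]
  split_ifs <;> simp_all; decide

-- ===== VERDICT (by name: the statement is the Claim_ definition above) =====
theorem detect_volatility_sources_from_types_spec : Claim_equal_detect_volatility_sources_from_types := by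
  intro leg_types _
  show _ = _
  unfold detect_volatility_sources_from_types
  obtain ⟨hnd, hpw⟩ := alt_nodup_sorted leg_types
  apply PySem.List.sorted_eq_of_perm_of_pairwise_lt
  · apply (List.perm_ext_iff_of_nodup hnd (pvALoop_nodup _ _ (by simp [PySem.Set.empty]))).mpr
    intro y
    rw [alt_mem, pvALoop_mem]
    simp [PySem.Set.empty]
  · exact hpw
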